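-- pv_equiv track=rewrite | github.com/liwen-cococo/TSBench | tsbench/algorithms/random/random_detector.py | detectPhase
-- ===== SOURCE A (Python) =====
-- def detectPhase(latter_values):
--     results = []
--     c = 0
--     for i in latter_values:
--         if c % 10 != 0:
--             results.append(0)
--         else:
--             results.append(1)
--         c += 1
--     return results
-- ===== SOURCE B (Python) =====
-- def detectPhase(latter_values):
--     vals = list(latter_values)
--     n = len(vals)
--     results = [0] * n
--     for i in range(0, n, 10):
--         results[i] = 1
--     return results
-- ===== Notes on version B (the rewrite author's own statement) =====
-- stated objective: alternative
-- what changed: Replaces the per-element modulo-counter append loop with allocating a zero list of the input's length and marking every 10th index via a strided range loop.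
import Mathlib
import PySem

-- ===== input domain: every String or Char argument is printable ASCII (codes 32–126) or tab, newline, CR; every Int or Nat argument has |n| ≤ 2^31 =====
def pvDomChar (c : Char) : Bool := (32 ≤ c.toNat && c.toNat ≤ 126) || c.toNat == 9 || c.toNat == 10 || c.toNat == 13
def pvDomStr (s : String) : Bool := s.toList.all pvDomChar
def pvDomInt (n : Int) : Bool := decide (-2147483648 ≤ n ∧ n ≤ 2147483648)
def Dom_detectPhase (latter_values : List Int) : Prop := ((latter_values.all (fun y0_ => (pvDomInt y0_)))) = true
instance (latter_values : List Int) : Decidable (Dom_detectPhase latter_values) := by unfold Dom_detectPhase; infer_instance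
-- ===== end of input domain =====

-- B replaces A's per-element modulo-counter append loop by allocating a zero list and
-- marking every 10th index with a strided range loop (alternative decomposition, same cost).


-- ===== PORT A =====
-- results = []; c = 0; for i in latter_values: append(0) if c % 10 != 0 else append(1); c += 1
def detectPhase (latter_values : List Int) : List Int :=
  (latter_values.foldl
    (fun (acc : List Int × Int) _ =>
      (acc.1 ++ [if PySem.Int.mod acc.2 10 ≠ 0 then (0 : Int) else 1], acc.2 + 1))
    ([], 0)).1

-- ===== PORT B =====
-- vals = list(latter_values); n = len(vals); results = [0]*n; for i in range(0, n, 10): results[i] = 1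
def detectPhase_alt (latter_values : List Int) : List Int :=
  let n := latter_values.length
  (PySem.List.pyRange 0 (n : Int) 10).foldl
    (fun (results : List Int) (i : Int) => results.set i.toNat 1)
    (List.replicate n 0)

-- ===== PRECONDITION & SPEC =====
def Spec_detectPhase (latter_values : List Int) (out : List Int) : Prop := out = detectPhase_alt latter_values
instance (latter_values : List Int) (out : List Int) : Decidable (Spec_detectPhase latter_values out) := by unfold Spec_detectPhase; infer_instance

-- ===== CLAIM (what is proved, stated in full; the proofs are below) =====
def Claim_equal_detectPhase : Prop := ∀ (latter_values : List Int), Dom_detectPhase latter_values → Spec_detectPhase latter_values (detectPhase latter_values)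

-- ===== LEMMAS AND PROOFS =====

-- A's loop, with the accumulator and counter generalized, produces the if-mod map.
theorem detectPhase_go (vals rs : List Int) (c : Nat) :
    (vals.foldl
      (fun (acc : List Int × Int) _ =>
        (acc.1 ++ [if PySem.Int.mod acc.2 10 ≠ 0 then (0 : Int) else 1], acc.2 + 1))
      (rs, (c : Int))).1
    = rs ++ (List.range vals.length).map
        (fun i => if (c + i) % 10 = 0 then (1 : Int) else 0) := by
  induction vals generalizing rs c with
  | nil => simp
  | cons v t ih =>
    have h1 : ((c : Int) + 1) = ((c + 1 : Nat) : Int) := by push_cast; ring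
    have hm : PySem.Int.mod (c : Int) 10 = ((c % 10 : Nat) : Int) := by
      exact_mod_cast PySem.Int.mod_natCast c 10
    have hfun : (fun i : Nat => if (c + 1 + i) % 10 = 0 then (1 : Int) else 0)
        = (fun i : Nat => if (c + Nat.succ i) % 10 = 0 then (1 : Int) else 0) := by
      funext i; rw [show c + 1 + i = c + Nat.succ i from by omega]
    have hhead : (if PySem.Int.mod (c : Int) 10 ≠ 0 then (0 : Int) else 1)
        = (if (c + 0) % 10 = 0 then (1 : Int) else 0) := by
      rw [hm]; by_cases h : c % 10 = 0 <;> simp [h]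
      omega
    simp only [List.foldl_cons, h1, ih, hfun, hhead]
    rw [List.length_cons, List.range_succ_eq_map]
    simp [List.map_map, Function.comp_def]

-- element j of B's mark-fold: 1 where j occurs (as a nonnegative index) in L, otherwise unchanged
theorem setfold_get? (L r : List Int) (hL : ∀ x ∈ L, 0 ≤ x) (j : Nat) :
    (L.foldl (fun (results : List Int) (i : Int) => results.set i.toNat 1) r)[j]?
    = if (j : Int) ∈ L then (if j < r.length then some 1 else none) else r[j]? := by
  induction L generalizing r with
  | nil => simp
  | cons x t ih =>
    have hx : 0 ≤ x := hL x (by simp)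
    rw [List.foldl_cons, ih (r.set x.toNat 1) (fun y hy => hL y (by simp [hy]))]
    have hlen : (r.set x.toNat 1).length = r.length := by simp
    by_cases hm : (j : Int) ∈ t
    · simp [hm, hlen]
    · have hiff : (x.toNat = j) ↔ ((j : Int) = x) := by omega
      by_cases he : (j : Int) = x
      · have hxj : x.toNat = j := by omega
        simp [he, hxj, List.getElem?_set]
      · simp [hm, he, hiff]

theorem detectPhase_spec : Claim_equal_detectPhase := by
  intro vals _
  unfold Spec_detectPhase detectPhase detectPhase_alt
  have hA := detectPhase_go vals [] 0
  simp only [Int.natCast_zero] at hA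
  rw [hA, List.nil_append]
  have hpos : (0 : Int) < 10 := by norm_num
  have hnn : ∀ x ∈ PySem.List.pyRange 0 (vals.length : Int) 10, (0 : Int) ≤ x := by
    intro x hx
    exact ((PySem.List.mem_pyRange_iff_of_pos hpos x).mp hx).1
  apply List.ext_getElem?
  intro j
  rw [setfold_get? _ _ hnn j]
  have hmem : ((j : Int) ∈ PySem.List.pyRange 0 (vals.length : Int) 10)
      ↔ (j < vals.length ∧ j % 10 = 0) := by
    rw [PySem.List.mem_pyRange_iff_of_pos hpos]
    constructor
    · rintro ⟨-, hlt, hdvd⟩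
      rw [Int.sub_zero] at hdvd
      constructor
      · exact_mod_cast hlt
      · omega
    · rintro ⟨hlt, hmod⟩
      refine ⟨by positivity, by exact_mod_cast hlt, ?_⟩
      rw [Int.sub_zero]; omega
  by_cases hj : j < vals.length
  · rw [List.getElem?_eq_getElem (by simpa using hj)]
    simp only [List.getElem_map, List.getElem_range, List.length_replicate]
    by_cases h10 : j % 10 = 0
    · simp [hmem, hj, h10]
    · simp [hmem, h10, hj]
  · have h1 : ((List.range vals.length).map
        (fun i => if (0 + i) % 10 = 0 then (1 : Int) else 0)).length = vals.length := by simp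
    rw [List.getElem?_eq_none (by simpa [h1] using hj)]
    by_cases hm : (j : Int) ∈ PySem.List.pyRange 0 (vals.length : Int) 10
    · exact absurd (hmem.mp hm).1 hj
    · simp [hm, hj]
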